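-- pv_equiv track=rewrite | github.com/DuwanSierra/Crypto | AES-C/keyExpansion.py | affine_transform
-- ===== SOURCE A (Python) =====
-- def affine_transform(x):
--     # Affine transformation matrix
--     matrix = [
--         [1, 0, 0, 0, 1, 1, 1, 1],
--         [1, 1, 0, 0, 0, 1, 1, 1],
--         [1, 1, 1, 0, 0, 0, 1, 1],
--         [1, 1, 1, 1, 0, 0, 0, 1],
--         [1, 1, 1, 1, 1, 0, 0, 0],
--         [0, 1, 1, 1, 1, 1, 0, 0],
--         [0, 0, 1, 1, 1, 1, 1, 0],
--         [0, 0, 0, 1, 1, 1, 1, 1]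
--     ]
--     c = 0x63  # Constant for the affine transformation
--     result = 0
--     for i in range(8):
--         bit = 0
--         for j in range(8):
--             bit ^= (x >> j & 1) * matrix[i][j]
--         result |= (bit << i)
--     return result ^ c
-- ===== SOURCE B (Python) =====
-- def affine_transform(x):
--     # Standard closed-form AES affine transform: XOR of cyclic byte rotations plus 0x63.
--     m = x & 0xFF
--
--     def rotr(v, k):
--         return ((v >> k) | (v << (8 - k))) & 0xFF
--
--     return m ^ rotr(m, 4) ^ rotr(m, 5) ^ rotr(m, 6) ^ rotr(m, 7) ^ 0x63
-- ===== Notes on version B (the rewrite author's own statement) =====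
-- stated objective: idiomatic
-- what changed: Replaces the 8x8 bit-matrix double loop with the standard closed-form AES affine identity: mask to a byte and XOR the byte with its cyclic 8-bit rotations by 4,5,6,7 and the constant 0x63.
import Mathlib
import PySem

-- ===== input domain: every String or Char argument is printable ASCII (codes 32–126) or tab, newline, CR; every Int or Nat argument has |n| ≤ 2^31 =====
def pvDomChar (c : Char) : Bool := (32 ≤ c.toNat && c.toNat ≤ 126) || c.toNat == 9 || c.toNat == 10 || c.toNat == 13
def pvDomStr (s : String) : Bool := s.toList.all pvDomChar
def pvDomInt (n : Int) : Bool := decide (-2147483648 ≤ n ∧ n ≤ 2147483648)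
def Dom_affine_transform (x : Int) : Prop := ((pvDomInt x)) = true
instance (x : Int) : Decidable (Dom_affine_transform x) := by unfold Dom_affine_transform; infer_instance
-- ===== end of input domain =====

-- B replaces A's 8x8 bit-matrix double loop with the closed-form AES affine identity
-- (byte XOR its cyclic rotations by 4,5,6,7 XOR 0x63); same results, plainer code.

-- ===== PORT A =====
def pvMatrix : List (List Int) :=
  [[1, 0, 0, 0, 1, 1, 1, 1],
   [1, 1, 0, 0, 0, 1, 1, 1],
   [1, 1, 1, 0, 0, 0, 1, 1],
   [1, 1, 1, 1, 0, 0, 0, 1],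
   [1, 1, 1, 1, 1, 0, 0, 0],
   [0, 1, 1, 1, 1, 1, 0, 0],
   [0, 0, 1, 1, 1, 1, 1, 0],
   [0, 0, 0, 1, 1, 1, 1, 1]]

-- `.getD` only makes the in-range indexing total: i, j range over 0..7 so pyGet? is always `some`.
def affine_transform (x : Int) : Int :=
  let c : Int := 0x63
  let result : Int :=
    (PySem.List.pyRange 0 8 1).foldl (fun result i =>
      let bit : Int :=
        (PySem.List.pyRange 0 8 1).foldl (fun bit j =>
          PySem.Int.bxor bit
            (PySem.Int.band (x >>> j.toNat) 1 *
              ((PySem.List.pyGet? (PySem.List.pyGet? pvMatrix i |>.getD []) j).getD 0))) 0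
      PySem.Int.bor result (bit <<< i.toNat)) 0
  PySem.Int.bxor result c

-- ===== PORT B =====
def pvRotr8 (v : Int) (k : Nat) : Int :=
  PySem.Int.band (PySem.Int.bor (v >>> k) (v <<< (8 - k))) 0xFF

def affine_transform_alt (x : Int) : Int :=
  let m : Int := PySem.Int.band x 0xFF
  PySem.Int.bxor
    (PySem.Int.bxor
      (PySem.Int.bxor
        (PySem.Int.bxor
          (PySem.Int.bxor m (pvRotr8 m 4))
          (pvRotr8 m 5))
        (pvRotr8 m 6))
      (pvRotr8 m 7))
    0x63

-- ===== PRECONDITION & SPEC =====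
def Spec_affine_transform (x : Int) (out : Int) : Prop := out = affine_transform_alt x
instance (x : Int) (out : Int) : Decidable (Spec_affine_transform x out) := by unfold Spec_affine_transform; infer_instance

-- ===== CLAIM (what is proved, stated in full; the proofs are below) =====
def Claim_equal_affine_transform : Prop := ∀ (x : Int), Dom_affine_transform x → Spec_affine_transform x (affine_transform x)

-- ===== LEMMAS AND PROOFS =====

-- x & 255 is x mod 256 (Python two's-complement semantics, also for negative x).
lemma pv_band255 (x : Int) : PySem.Int.band x 255 = x % 256 := by
  unfold PySem.Int.band
  have h255 : Int.toNat 255 = 255 := rfl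
  have e : (2 : Nat) ^ 8 - 1 = 255 := rfl
  split_ifs with h1 h2 h2
  · rw [h255]
    have h := Nat.and_two_pow_sub_one_eq_mod x.toNat 8
    rw [e] at h
    omega
  · omega
  · rw [h255, Nat.and_comm]
    have h := Nat.and_two_pow_sub_one_eq_mod (-x - 1).toNat 8
    rw [e] at h
    omega
  · omega

-- bit j (j < 8) of x only depends on x mod 256
lemma pv_bit_reduce (x : Int) (j : Nat) (hj : j < 8) :
    PySem.Int.band (x >>> j) 1 = PySem.Int.band ((x % 256) >>> j) 1 := by
  rw [PySem.Int.band_one, PySem.Int.band_one, PySem.Int.mod_eq_emod_of_pos (by norm_num),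
    PySem.Int.mod_eq_emod_of_pos (by norm_num), Int.shiftRight_eq_div_pow,
    Int.shiftRight_eq_div_pow]
  interval_cases j <;> norm_num <;> omega

lemma pv_A_reduce (x : Int) : affine_transform x = affine_transform ((x % 256)) := by
  simp only [affine_transform]
  refine congrArg (fun r => PySem.Int.bxor r 99) ?_
  refine List.foldl_ext _ _ _ (fun result i hi => ?_)
  refine congrArg (fun b : Int => PySem.Int.bor result (b <<< i.toNat)) ?_
  refine List.foldl_ext _ _ _ (fun bit j hj => ?_)
  rw [PySem.List.mem_pyRange_one] at hj
  rw [Int.shiftRight_natCast_right, Int.shiftRight_natCast_right, pv_bit_reduce x j.toNat (by omega)]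

lemma pv_B_reduce (x : Int) : affine_transform_alt x = affine_transform_alt (x % 256) := by
  unfold affine_transform_alt
  have h : (x % 256) % 256 = x % 256 := Int.emod_emod_of_dvd x dvd_rfl
  rw [pv_band255, pv_band255, h]

set_option maxRecDepth 8192 in
lemma pv_key : ∀ r : Fin 256, affine_transform (r.val : Int) = affine_transform_alt (r.val : Int) := by
  decide

-- ===== VERDICT (by name: the statement is the Claim_ definition above) =====
theorem affine_transform_spec : Claim_equal_affine_transform := by
  intro x _
  unfold Spec_affine_transform
  rw [pv_A_reduce, pv_B_reduce]
  have h : x % 256 = ((x % 256).toNat : Int) := by omega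
  rw [h]
  exact pv_key ⟨(x % 256).toNat, by omega⟩
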